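-- pv_equiv track=rewrite | github.com/Shirshaw64p/Lucifer | agents/orchestrator.py | route_after_approval
-- ===== SOURCE A (Python) =====
-- from typing import Any, Dict, List, Literal, Optional, Sequence, TypedDict
--
-- class OrchestratorState(TypedDict, total=False):
--     """Full state of the orchestrator graph — persisted after every transition."""
--     run_id: str
--     target: str
--     scope: Dict[str, Any]
--     engagement_config: Dict[str, Any]
--     task_graph: List[Dict[str, Any]]  # serialised TaskNode list
--     agent_results: Dict[str, Any]  # task_id → result
--     findings: List[Dict[str, Any]]  # serialised Finding list
--     pending_approvals: List[Dict[str, Any]]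
--     current_node: str
--     status: str  # planning | delegating | waiting | approval_blocked | analyzing | complete | failed
--     error: Optional[str]
--     started_at: str
--     completed_at: Optional[str]
--     metadata: Dict[str, Any]
--
-- def route_after_approval(state: OrchestratorState) -> str:
--     """After APPROVAL_GATE, re-enter WAIT or DELEGATE."""
--     task_graph = state.get("task_graph", [])
--     running = [t for t in task_graph if t.get("status") == "running"]
--     if running:
--         return "WAIT_FOR_REPORT"
--
--     pending = [t for t in task_graph if t.get("status") == "pending"]
--     if pending:
--         return "DELEGATE"
--
--     return "ANALYZE"
-- ===== SOURCE B (Python) =====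
-- def route_after_approval(state) -> str:
--     """After APPROVAL_GATE, re-enter WAIT or DELEGATE."""
--     has_pending = False
--     for t in state.get("task_graph", []):
--         status = t.get("status")
--         if status == "running":
--             return "WAIT_FOR_REPORT"
--         if status == "pending":
--             has_pending = True
--     return "DELEGATE" if has_pending else "ANALYZE"
-- ===== Notes on version B (the rewrite author's own statement) =====
-- stated objective: simpler
-- what changed: Replaced the two filtered-list passes over task_graph by a single loop that returns WAIT_FOR_REPORT at the first running task and maintains a has_pending flag, deciding DELEGATE/ANALYZE after the loop.
import Mathlib
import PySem

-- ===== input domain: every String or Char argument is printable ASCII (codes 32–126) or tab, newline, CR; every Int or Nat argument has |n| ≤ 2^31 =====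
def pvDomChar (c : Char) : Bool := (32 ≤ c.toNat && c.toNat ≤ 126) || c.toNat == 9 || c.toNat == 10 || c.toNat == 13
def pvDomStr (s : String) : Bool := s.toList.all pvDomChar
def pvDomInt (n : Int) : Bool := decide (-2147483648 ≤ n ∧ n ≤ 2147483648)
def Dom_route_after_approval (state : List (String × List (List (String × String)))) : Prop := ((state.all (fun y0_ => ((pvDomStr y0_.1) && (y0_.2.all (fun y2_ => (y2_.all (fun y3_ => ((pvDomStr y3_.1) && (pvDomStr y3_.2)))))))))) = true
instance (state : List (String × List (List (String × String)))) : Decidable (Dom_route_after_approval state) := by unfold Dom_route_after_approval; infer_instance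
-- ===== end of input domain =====

-- B replaces A's two filter passes by one loop with a has_pending flag and early return (simpler, one traversal).


-- ===== PORT A =====
def route_after_approval (state : List (String × List (List (String × String)))) : String :=
  let task_graph := (state.lookup "task_graph").getD []
  let running := task_graph.filter (fun t => t.lookup "status" == some "running")
  if !running.isEmpty then "WAIT_FOR_REPORT"
  else
    let pending := task_graph.filter (fun t => t.lookup "status" == some "pending")
    if !pending.isEmpty then "DELEGATE"
    else "ANALYZE"

-- ===== PORT B =====
-- single pass with a has_pending flag, early return on a running task
def raaGo : List (List (String × String)) → Bool → String
  | [], hasPending => if hasPending then "DELEGATE" else "ANALYZE"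
  | t :: rest, hasPending =>
    let status := t.lookup "status"
    if status == some "running" then "WAIT_FOR_REPORT"
    else raaGo rest (hasPending || status == some "pending")

def route_after_approval_alt (state : List (String × List (List (String × String)))) : String :=
  raaGo ((state.lookup "task_graph").getD []) false

-- ===== PRECONDITION & SPEC =====
def Spec_route_after_approval (state : List (String × List (List (String × String)))) (out : String) : Prop := out = route_after_approval_alt state
instance (state : List (String × List (List (String × String)))) (out : String) : Decidable (Spec_route_after_approval state out) := by unfold Spec_route_after_approval; infer_instance

-- ===== CLAIM (what is proved, stated in full; the proofs are below) =====
def Claim_equal_route_after_approval : Prop := ∀ (state : List (String × List (List (String × String)))), Dom_route_after_approval state → Spec_route_after_approval state (route_after_approval state)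

-- ===== LEMMAS AND PROOFS =====

lemma raaGo_char (ts : List (List (String × String))) (hp : Bool) :
    raaGo ts hp =
      if !(ts.filter (fun t => t.lookup "status" == some "running")).isEmpty then "WAIT_FOR_REPORT"
      else if hp || !(ts.filter (fun t => t.lookup "status" == some "pending")).isEmpty then "DELEGATE"
      else "ANALYZE" := by
  induction ts generalizing hp with
  | nil => cases hp <;> simp [raaGo]
  | cons t rest ih =>
    simp only [raaGo, List.filter_cons]
    by_cases hr : (t.lookup "status" == some "running") = true
    · simp [hr]
    · by_cases hpd : (t.lookup "status" == some "pending") = true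
      · simp [hr, hpd, ih]
      · simp [hr, hpd, ih]

-- ===== VERDICT (by name: the statement is the Claim_ definition above) =====
theorem route_after_approval_spec : Claim_equal_route_after_approval := by
  intro state _
  unfold Spec_route_after_approval route_after_approval route_after_approval_alt
  rw [raaGo_char]
  simp
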